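-- pv_equiv track=rewrite | github.com/AnSloge/inf273-assignments | assignments/assignment4/src/simulated_annealing_new_operators.py | _first_valid_positions
-- ===== SOURCE A (Python) =====
-- from typing import Any, Dict, List, Optional, Set, Tuple
--
-- def _first_valid_positions(route: List[int], launch_node: int, reconvene_node: int) -> Optional[Tuple[int, int]]:
--     """Return first (launch_idx, reconvene_idx) where launch appears before reconvene."""
--     for i, node_i in enumerate(route):
--         if node_i != launch_node:
--             continue
--         for j in range(i + 1, len(route)):
--             if route[j] == reconvene_node:
--                 return i, j
--     return None
-- ===== SOURCE B (Python) =====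
-- from typing import List, Optional, Tuple
--
-- def _first_valid_positions(route: List[int], launch_node: int, reconvene_node: int) -> Optional[Tuple[int, int]]:
--     """State-machine pass: remember the first launch index, then
--     return at the first reconvene index strictly after it."""
--     launch_idx = None
--     for idx, node in enumerate(route):
--         if launch_idx is None:
--             if node == launch_node:
--                 launch_idx = idx
--         elif node == reconvene_node:
--             return launch_idx, idx
--     return None
-- ===== Notes on version B (the rewrite author's own statement) =====
-- stated objective: alternative
-- what changed: Replaced the nested double loop (for each launch occurrence, rescan the whole tail for a reconvene) by a single linear state-machine pass that records the first launch index and returns at the first later reconvene.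
import Mathlib
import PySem

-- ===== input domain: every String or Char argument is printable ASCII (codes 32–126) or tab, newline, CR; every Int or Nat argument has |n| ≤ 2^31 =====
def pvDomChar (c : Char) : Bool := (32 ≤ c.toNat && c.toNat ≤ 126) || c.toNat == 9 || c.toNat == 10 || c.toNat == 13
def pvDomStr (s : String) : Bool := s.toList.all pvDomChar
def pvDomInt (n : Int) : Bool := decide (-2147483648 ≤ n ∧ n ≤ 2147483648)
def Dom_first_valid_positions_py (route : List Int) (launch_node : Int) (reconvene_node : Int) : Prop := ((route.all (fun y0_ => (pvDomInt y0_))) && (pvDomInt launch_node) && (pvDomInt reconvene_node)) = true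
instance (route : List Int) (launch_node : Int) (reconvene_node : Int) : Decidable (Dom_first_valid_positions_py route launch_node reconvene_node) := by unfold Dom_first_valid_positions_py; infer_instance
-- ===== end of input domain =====

-- ===== PORT A =====
-- B replaces the nested rescans by a single state-machine pass; equality of return values is proved below.
-- inner loop of A: 'for j in range(i+1, len(route)): if route[j] == reconvene_node: return i, j'
def pvA_inner (route : List Int) (i : Int) (reconvene_node : Int) : List Int → Option (Int × Int)
  | [] => none
  | j :: js =>
      if PySem.List.pyGet? route j = some reconvene_node then some (i, j)
      else pvA_inner route i reconvene_node js

-- outer loop of A: 'for i, node_i in enumerate(route)' rendered as recursion over the suffix carrying the index i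
def pvA_outer (route : List Int) (launch_node : Int) (reconvene_node : Int) (i : Int) : List Int → Option (Int × Int)
  | [] => none
  | node :: rest =>
      if node ≠ launch_node then pvA_outer route launch_node reconvene_node (i + 1) rest
      else
        match pvA_inner route i reconvene_node (PySem.List.pyRange (i + 1) route.length 1) with
        | some p => some p
        | none => pvA_outer route launch_node reconvene_node (i + 1) rest

def first_valid_positions_py (route : List Int) (launch_node : Int) (reconvene_node : Int) : Option (Int × Int) :=
  pvA_outer route launch_node reconvene_node 0 route

-- ===== PORT B =====
-- B's single pass with state launch_idx : Option Int, index idx carried through the recursion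
def pvB_go (launch_node : Int) (reconvene_node : Int) (launch_idx : Option Int) (idx : Int) : List Int → Option (Int × Int)
  | [] => none
  | node :: rest =>
      match launch_idx with
      | none =>
          if node = launch_node then pvB_go launch_node reconvene_node (some idx) (idx + 1) rest
          else pvB_go launch_node reconvene_node none (idx + 1) rest
      | some li =>
          if node = reconvene_node then some (li, idx)
          else pvB_go launch_node reconvene_node (some li) (idx + 1) rest

def first_valid_positions_py_alt (route : List Int) (launch_node : Int) (reconvene_node : Int) : Option (Int × Int) :=
  pvB_go launch_node reconvene_node none 0 route

-- ===== PRECONDITION & SPEC =====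
def Spec_first_valid_positions_py (route : List Int) (launch_node : Int) (reconvene_node : Int) (out : Option (Int × Int)) : Prop := out = first_valid_positions_py_alt route launch_node reconvene_node
instance (route : List Int) (launch_node : Int) (reconvene_node : Int) (out : Option (Int × Int)) : Decidable (Spec_first_valid_positions_py route launch_node reconvene_node out) := by unfold Spec_first_valid_positions_py; infer_instance

-- ===== CLAIM (what is proved, stated in full; the proofs are below) =====
def Claim_equal_first_valid_positions_py : Prop := ∀ (route : List Int) (launch_node : Int) (reconvene_node : Int), Dom_first_valid_positions_py route launch_node reconvene_node → Spec_first_valid_positions_py route launch_node reconvene_node (first_valid_positions_py route launch_node reconvene_node)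

-- ===== LEMMAS AND PROOFS =====

-- reference scan: first occurrence of rv in the suffix, paired with li
def pvScanRV (rv li : Int) (i : Int) : List Int → Option (Int × Int)
  | [] => none
  | x :: xs => if x = rv then some (li, i) else pvScanRV rv li (i + 1) xs

theorem pvB_some_eq_scan (lv rv li i : Int) (l : List Int) :
    pvB_go lv rv (some li) i l = pvScanRV rv li i l := by
  induction l generalizing i with
  | nil => rfl
  | cons x xs ih => simp [pvB_go, pvScanRV, ih]

theorem pvScan_none_iff (rv li i : Int) (l : List Int) :
    pvScanRV rv li i l = none ↔ rv ∉ l := by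
  induction l generalizing i with
  | nil => simp [pvScanRV]
  | cons x xs ih =>
      by_cases hx : x = rv
      · simp [pvScanRV, hx]
      · simp only [pvScanRV, if_neg hx, ih, List.mem_cons, not_or]
        constructor
        · intro h
          exact ⟨fun he => hx he.symm, h⟩
        · intro h
          exact h.2

theorem pvA_inner_eq_scan (route : List Int) (i rv : Int) (a : Nat) :
    pvA_inner route i rv (PySem.List.pyRange a route.length 1) =
      pvScanRV rv i a (route.drop a) := by
  by_cases hlt : a < route.length
  · rw [PySem.List.pyRange_one_cons (by exact_mod_cast hlt)]
    have hget : PySem.List.pyGet? route (a : Int) = some route[a] := by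
      simp [PySem.List.pyGet?_natCast, List.getElem?_eq_getElem hlt]
    have hdrop : route.drop a = route[a] :: route.drop (a + 1) :=
      List.drop_eq_getElem_cons hlt
    rw [hdrop]
    by_cases hv : route[a] = rv
    · simp [pvA_inner, pvScanRV, hget, hv]
    · have hcast : ((a : Int) + 1) = ((a + 1 : Nat) : Int) := by push_cast; ring
      simp only [pvA_inner, pvScanRV, hget, Option.some.injEq, hv, hcast]
      exact pvA_inner_eq_scan route i rv (a + 1)
  · rw [PySem.List.pyRange_one_eq_nil (by omega : (route.length : Int) ≤ a)]
    rw [List.drop_eq_nil_of_le (by omega)]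
    rfl
termination_by route.length - a

theorem pvA_outer_none (route : List Int) (lv rv : Int) (a : Nat) (suffix : List Int)
    (hs : suffix = route.drop a) (hrv : rv ∉ suffix) :
    pvA_outer route lv rv a suffix = none := by
  induction suffix generalizing a with
  | nil => rfl
  | cons node rest ih =>
      have hlen : a < route.length := by
        by_contra h
        rw [List.drop_eq_nil_of_le (by omega)] at hs
        exact List.cons_ne_nil _ _ hs
      have hrest : rest = route.drop (a + 1) := by
        have hd := List.drop_eq_getElem_cons hlen
        rw [hd] at hs
        exact (List.cons.injEq _ _ _ _ ▸ hs).2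
      have hcast : ((a : Int) + 1) = ((a + 1 : Nat) : Int) := by push_cast; ring
      have hrec := ih (a + 1) hrest (fun h => hrv (List.mem_cons_of_mem _ h))
      rw [← hcast] at hrec
      have hinner := pvA_inner_eq_scan route (a : Int) rv (a + 1)
      rw [← hrest, ← hcast] at hinner
      by_cases hn : node = lv
      · have hnone : pvScanRV rv (a : Int) ((a : Int) + 1) rest = none :=
          (pvScan_none_iff _ _ _ _).mpr (fun h => hrv (List.mem_cons_of_mem _ h))
        simp only [pvA_outer, hn, ne_eq, not_true_eq_false, if_false, hinner, hnone]
        exact hrec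
      · simp only [pvA_outer, ne_eq, hn, not_false_eq_true, if_true]
        exact hrec

theorem pvMain (route : List Int) (lv rv : Int) (a : Nat) (suffix : List Int)
    (hs : suffix = route.drop a) :
    pvA_outer route lv rv a suffix = pvB_go lv rv none a suffix := by
  induction suffix generalizing a with
  | nil => rfl
  | cons node rest ih =>
      have hlen : a < route.length := by
        by_contra h
        rw [List.drop_eq_nil_of_le (by omega)] at hs
        exact List.cons_ne_nil _ _ hs
      have hrest : rest = route.drop (a + 1) := by
        have hd := List.drop_eq_getElem_cons hlen
        rw [hd] at hs
        exact (List.cons.injEq _ _ _ _ ▸ hs).2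
      have hcast : ((a : Int) + 1) = ((a + 1 : Nat) : Int) := by push_cast; ring
      have hrec := ih (a + 1) hrest
      rw [← hcast] at hrec
      by_cases hn : node = lv
      · have hinner := pvA_inner_eq_scan route (a : Int) rv (a + 1)
        rw [← hrest, ← hcast] at hinner
        simp only [pvA_outer, pvB_go, hn, ne_eq, not_true_eq_false, if_false, if_true, hinner]
        rw [pvB_some_eq_scan]
        cases hscan : pvScanRV rv (a : Int) ((a : Int) + 1) rest with
        | some p => rfl
        | none =>
            show pvA_outer route lv rv ((a : Int) + 1) rest = none
            rw [hcast]
            exact pvA_outer_none route lv rv (a + 1) rest hrest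
              ((pvScan_none_iff _ _ _ _).mp hscan)
      · simp only [pvA_outer, pvB_go, ne_eq, hn, not_false_eq_true, if_true, if_false]
        exact hrec

-- ===== VERDICT (by name: the statement is the Claim_ definition above) =====
theorem first_valid_positions_py_spec : Claim_equal_first_valid_positions_py := by
  intro route lv rv _
  unfold Spec_first_valid_positions_py first_valid_positions_py first_valid_positions_py_alt
  exact_mod_cast pvMain route lv rv 0 route rfl
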